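-- pv_equiv track=rewrite | github.com/artem1285/Python_START | HW_6/task_1.py | find
-- ===== SOURCE A (Python) =====
-- def find(exp, sech_operand):  # Ф которая ищет конкретно знаки * и /
--     ind_start = 0
--     ind_finish = 0
--     ind_oper = 0
--     operand_full = ['*', '/', '-', '+']
--     operands = ['*', '/', '-', '+']
--     for op in sech_operand:  # создадим цикл for
--         operands.remove(op)
--     found = False
--     for i, sim in enumerate(exp):
--         if i == 0 and sim == '-':
--             continue
--         if not found and sim in operands:
--             ind_start = i + 1
--         elif found and sim in operand_full:
--             ind_finish = i - 1
--             return ind_start, ind_finish, ind_oper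
--         elif sim in sech_operand:
--             found = True
--             ind_oper = i
--             ind_finish = len(exp) - 1  # len возвращает только целое число
--     return ind_start, ind_finish, ind_oper
-- ===== SOURCE B (Python) =====
-- def find(exp, sech_operand):
--     # Locate the target operator, then expand left/right, instead of A's
--     # single-pass found-flag state machine.
--     full = ['*', '/', '-', '+']
--     others = ['*', '/', '-', '+']
--     for op in sech_operand:
--         others.remove(op)
--
--     def ok(i, ch):  # A skips an index-0 leading minus
--         return not (i == 0 and ch == '-')
--
--     ind_oper = next((i for i, ch in enumerate(exp)
--                      if ok(i, ch) and ch in sech_operand), None)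
--     if ind_oper is None:
--         last = max((i for i, ch in enumerate(exp)
--                     if ok(i, ch) and ch in others), default=None)
--         return (0 if last is None else last + 1), 0, 0
--     last = max((i for i, ch in enumerate(exp)
--                 if i < ind_oper and ok(i, ch) and ch in others), default=None)
--     ind_start = 0 if last is None else last + 1
--     nxt = next((i for i, ch in enumerate(exp)
--                 if ind_oper < i and ch in full), None)
--     ind_finish = len(exp) - 1 if nxt is None else nxt - 1
--     return ind_start, ind_finish, ind_oper
-- ===== Notes on version B (the rewrite author's own statement) =====
-- stated objective: alternative
-- what changed: Replaced A's single-pass found-flag state machine by a three-scan decomposition: locate the first accepted target operator, then take the last non-target operator before it for ind_start and the first operator after it for ind_finish.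
import Mathlib
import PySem

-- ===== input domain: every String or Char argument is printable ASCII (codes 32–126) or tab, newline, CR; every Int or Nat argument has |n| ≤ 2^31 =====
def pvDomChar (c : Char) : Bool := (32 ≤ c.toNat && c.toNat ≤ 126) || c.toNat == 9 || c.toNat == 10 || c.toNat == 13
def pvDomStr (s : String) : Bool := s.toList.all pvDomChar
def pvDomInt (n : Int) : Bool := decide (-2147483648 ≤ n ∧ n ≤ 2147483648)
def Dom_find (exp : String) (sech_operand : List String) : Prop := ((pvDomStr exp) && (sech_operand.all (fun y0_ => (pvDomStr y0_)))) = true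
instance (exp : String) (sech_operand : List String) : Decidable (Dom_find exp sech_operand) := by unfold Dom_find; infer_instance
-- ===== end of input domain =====

-- B locates the target operator first and then expands left/right with three
-- independent scans, replacing A's single-pass found-flag state machine
-- (objective: alternative decomposition; same asymptotic cost).

-- ===== PORT A =====

-- Python ['*', '/', '-', '+']
def pvFull : List String := ["*", "/", "-", "+"]

-- Python 'sim in lst' where sim is a one-character string taken from exp
def pvMemS (c : Char) (l : List String) : Bool := l.contains (String.ofList [c])

-- the for-loop of A: state (ind_start, ind_finish, ind_oper, found); early return on branch 2
def findLoop (sech operands : List String) (n : Int) :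
    List (Int × Char) → Int → Int → Int → Bool → Int × Int × Int
  | [], s, f, o, _ => (s, f, o)
  | (i, c) :: rest, s, f, o, found =>
    if i == 0 && c == '-' then findLoop sech operands n rest s f o found
    else if !found && pvMemS c operands then findLoop sech operands n rest (i + 1) f o found
    else if found && pvMemS c pvFull then (s, i - 1, o)
    else if pvMemS c sech then findLoop sech operands n rest s (n - 1) i true
    else findLoop sech operands n rest s f o found

def find (exp : String) (sech_operand : List String) : Int × Int × Int :=
  -- operands.remove(op) for each op; Python raises ValueError when op is absent
  -- (those inputs are excluded by Pre_find; .getD keeps the port total)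
  let operands := sech_operand.foldl
    (fun acc op => (PySem.List.remove? acc op).getD acc) ["*", "/", "-", "+"]
  findLoop sech_operand operands ((exp.toList.length : Int))
    (PySem.List.enumerate exp.toList 0) 0 0 0 false

-- ===== PORT B =====

-- not (i == 0 and ch == '-')
def pvIdxOk (i : Int) (c : Char) : Bool := !(i == 0 && c == '-')

def find_alt (exp : String) (sech_operand : List String) : Int × Int × Int :=
  let l := exp.toList
  let n : Int := l.length
  let others := sech_operand.foldl
    (fun acc op => (PySem.List.remove? acc op).getD acc) ["*", "/", "-", "+"]
  let en := PySem.List.enumerate l 0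
  match en.find? (fun p => pvIdxOk p.1 p.2 && pvMemS p.2 sech_operand) with
  | none =>
      match ((en.filter (fun p => pvIdxOk p.1 p.2 && pvMemS p.2 others)).map Prod.fst).getLast? with
      | none => (0, 0, 0)
      | some k => (k + 1, 0, 0)
  | some (j, _) =>
      let start : Int :=
        match ((en.filter (fun p => decide (p.1 < j) && (pvIdxOk p.1 p.2 && pvMemS p.2 others))).map Prod.fst).getLast? with
        | none => 0
        | some k => k + 1
      let fin : Int :=
        match en.find? (fun p => decide (j < p.1) && pvMemS p.2 pvFull) with
        | none => n - 1
        | some q => q.1 - 1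
      (start, fin, j)

-- ===== PRECONDITION & SPEC =====
-- Pre_ excludes exactly the inputs where A (and B alike) raises ValueError:
-- list.remove fails when some element of sech_operand is not (still) in
-- ['*','/','-','+'], i.e. on a duplicate or an element outside that list.
def Pre_find (exp : String) (sech_operand : List String) : Prop :=
  sech_operand.Nodup ∧ ∀ op ∈ sech_operand, op ∈ ["*", "/", "-", "+"]
instance (exp : String) (sech_operand : List String) : Decidable (Pre_find exp sech_operand) := by
  unfold Pre_find; infer_instance

def pvWitness_find : String × List String := ("12*34+5", ["*", "/"])

def Spec_find (exp : String) (sech_operand : List String) (out : Int × Int × Int) : Prop :=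
  out = find_alt exp sech_operand
instance (exp : String) (sech_operand : List String) (out : Int × Int × Int) : Decidable (Spec_find exp sech_operand out) := by unfold Spec_find; infer_instance

-- ===== CLAIM (what is proved, stated in full; the proofs are below) =====
def Claim_equal_find : Prop := ∀ (exp : String) (sech_operand : List String), Dom_find exp sech_operand → Pre_find exp sech_operand → Spec_find exp sech_operand (find exp sech_operand)

-- ===== LEMMAS AND PROOFS =====

-- (remove? l a).getD l is exactly List.erase
theorem remove_getD {l : List String} {a : String} :
    (PySem.List.remove? l a).getD l = l.erase a := by
  by_cases h : a ∈ l
  · rw [PySem.List.remove?_eq_some_erase l a h]; rfl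
  · rw [(PySem.List.remove?_eq_none_iff l a).mpr h, List.erase_of_not_mem h]; rfl

-- A's operand list after the removals equals B's filtered list (base nodup)
theorem foldl_remove_eq_filter :
    ∀ (ops base : List String), base.Nodup →
      ops.foldl (fun acc op => (PySem.List.remove? acc op).getD acc) base
        = base.filter (fun x => !ops.contains x) := by
  intro ops
  induction ops with
  | nil => intro base _; simp
  | cons a ops ih =>
    intro base hnd
    simp only [List.foldl_cons]
    rw [remove_getD, ih _ (hnd.erase a), hnd.erase_eq_filter, List.filter_filter]
    apply List.filter_congr
    intro x _
    simp only [List.contains_cons, Bool.not_or]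
    cases h : x == a <;> simp [bne, h, Bool.and_comm]

-- the pre-`found` accumulation of ind_start over a block of non-matching chars
def startUpd (others : List String) (ps : List (Int × Char)) (s : Int) : Int :=
  ps.foldl (fun s p => if pvIdxOk p.1 p.2 && pvMemS p.2 others then p.1 + 1 else s) s

-- the accumulated ind_start is "last accepted operand index + 1"
theorem startUpd_eq (others : List String) :
    ∀ (ps : List (Int × Char)) (s : Int),
      startUpd others ps s
        = match ((ps.filter (fun p => pvIdxOk p.1 p.2 && pvMemS p.2 others)).map Prod.fst).getLast? with
          | none => s
          | some k => k + 1 := by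
  intro ps
  induction ps with
  | nil => intro s; simp [startUpd]
  | cons p ps ih =>
    intro s
    by_cases h : (pvIdxOk p.1 p.2 && pvMemS p.2 others) = true
    · simp only [startUpd, List.foldl_cons, List.filter_cons, h, if_true, List.map_cons,
        List.getLast?_cons]
      rw [show (List.foldl (fun s p => if pvIdxOk p.1 p.2 && pvMemS p.2 others then p.1 + 1 else s) (p.1+1) ps) = startUpd others ps (p.1+1) from rfl, ih]
      cases hL : ((ps.filter (fun p => pvIdxOk p.1 p.2 && pvMemS p.2 others)).map Prod.fst).getLast? <;> simp_all
    · simp only [startUpd, List.foldl_cons, List.filter_cons, h, Bool.false_eq_true, if_false]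
      rw [show (List.foldl (fun s p => if pvIdxOk p.1 p.2 && pvMemS p.2 others then p.1 + 1 else s) s ps) = startUpd others ps s from rfl, ih]

theorem phase1 (sech others : List String) (n : Int) :
    ∀ (ps rest : List (Int × Char)) (s f o : Int),
      (∀ p ∈ ps, (pvIdxOk p.1 p.2 && pvMemS p.2 sech) = false) →
      findLoop sech others n (ps ++ rest) s f o false
        = findLoop sech others n rest (startUpd others ps s) f o false := by
  intro ps
  induction ps with
  | nil => intro rest s f o _; simp [startUpd]
  | cons p ps ih =>
    rintro rest s f o hno
    obtain ⟨i, c⟩ := p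
    have hni := hno (i, c) (by simp)
    by_cases hsk : (i == 0 && c == '-') = true
    · rw [List.cons_append, findLoop, if_pos hsk, ih _ _ _ _ (fun q hq => hno q (by simp [hq]))]
      have : pvIdxOk i c = false := by simp [pvIdxOk, hsk]
      simp [startUpd, this]
    · have hok : pvIdxOk i c = true := by simp [pvIdxOk, hsk]
      have hsech : pvMemS c sech = false := by
        cases hm : pvMemS c sech
        · rfl
        · rw [hok, hm] at hni; simp at hni
      by_cases hop : pvMemS c others = true
      · rw [List.cons_append, findLoop, if_neg (by simp_all), if_pos (by simp [hop]),
          ih _ _ _ _ (fun q hq => hno q (by simp [hq]))]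
        simp [startUpd, hok, hop]
      · rw [List.cons_append, findLoop, if_neg (by simp_all),
          if_neg (by simp [Bool.not_eq_true] at hop; simp [hop]), if_neg (by simp),
          if_neg (by simp [hsech]), ih _ _ _ _ (fun q hq => hno q (by simp [hq]))]
        simp [startUpd, Bool.not_eq_true] at hop ⊢
        simp [hop]

theorem phase2 (sech others : List String) (n : Int)
    (hsub : ∀ c, pvMemS c sech = true → pvMemS c pvFull = true) :
    ∀ (ps : List (Int × Char)) (s f o : Int),
      (∀ p ∈ ps, (p.1 == 0 && p.2 == '-') = false) →
      findLoop sech others n ps s f o true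
        = match ps.find? (fun p => pvMemS p.2 pvFull) with
          | none => (s, f, o)
          | some q => (s, q.1 - 1, o) := by
  intro ps
  induction ps with
  | nil => intro s f o _; simp [findLoop]
  | cons p ps ih =>
    rintro s f o hno
    obtain ⟨i, c⟩ := p
    have hsk := hno (i, c) (by simp)
    by_cases hfull : pvMemS c pvFull = true
    · rw [findLoop, if_neg (by simp [hsk]), if_neg (by simp), if_pos (by simp [hfull])]
      simp [hfull]
    · have hsech : pvMemS c sech = false := by
        cases hm : pvMemS c sech
        · rfl
        · exact absurd (hsub c hm) hfull
      rw [findLoop, if_neg (by simp [hsk]), if_neg (by simp),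
        if_neg (by simp [hfull]), if_neg (by simp [hsech]),
        ih _ _ _ (fun q hq => hno q (by simp [hq]))]
      simp only [List.find?_cons]
      cases hm : pvMemS c pvFull
      · simp
      · exact absurd hm (by simpa using hfull)

theorem pvFindDropLt (j : Int) (R : Int × Char → Bool) :
    ∀ (l : List (Int × Char)), (∀ p ∈ l, j < p.1) →
      l.find? (fun p => decide (j < p.1) && R p) = l.find? R := by
  intro l
  induction l with
  | nil => intro; rfl
  | cons p l ih =>
    intro h
    have hp : j < p.1 := h p (by simp)
    simp only [List.find?_cons, decide_eq_true hp, Bool.true_and]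
    cases R p
    · exact ih (fun q hq => h q (by simp [hq]))
    · rfl

-- A = B on every input satisfying Pre_find
theorem find_equiv_main : ∀ (exp : String) (sech_operand : List String), Pre_find exp sech_operand →
    find exp sech_operand = find_alt exp sech_operand := by
  intro exp sech hpre
  obtain ⟨hnd, hsub⟩ := hpre
  have hsubC : ∀ c, pvMemS c sech = true → pvMemS c pvFull = true := by
    intro c hc
    simp only [pvMemS, List.contains_eq_mem, decide_eq_true_eq] at hc ⊢
    exact hsub _ hc
  simp only [find, find_alt]
  rw [foldl_remove_eq_filter sech _ (by decide)]
  rw [show List.filter (fun x => !sech.contains x) ["*", "/", "-", "+"]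
        = pvFull.filter (fun op => !sech.contains op) from rfl]
  set others := pvFull.filter (fun op => !sech.contains op) with hothers
  have hothersC : ∀ c, pvMemS c others = true → pvMemS c sech = false := by
    intro c hc
    simp only [pvMemS, List.contains_eq_mem, decide_eq_true_eq, hothers,
      List.mem_filter] at hc ⊢
    simpa using hc.2
  set l := exp.toList
  set n : Int := (l.length : Int) with hn
  set en := PySem.List.enumerate l 0 with hen
  have hpw : en.Pairwise (fun p q => p.1 < q.1) := PySem.List.pairwise_lt_enumerate l 0
  have hpos : ∀ p ∈ en, (0:Int) ≤ p.1 := by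
    intro p hp
    rw [hen, PySem.List.mem_enumerate_iff] at hp
    obtain ⟨k, hk, rfl⟩ := hp
    simp
  cases hF : en.find? (fun p => pvIdxOk p.1 p.2 && pvMemS p.2 sech) with
  | none =>
    have hall := List.find?_eq_none.mp hF
    have := phase1 sech others n en [] 0 0 0 (by
      intro p hp; simpa using hall p hp)
    rw [List.append_nil] at this
    rw [this, startUpd_eq]
    cases hL : ((en.filter (fun p => pvIdxOk p.1 p.2 && pvMemS p.2 others)).map Prod.fst).getLast? <;>
      simp [findLoop]
  | some jc =>
    obtain ⟨j, c⟩ := jc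
    obtain ⟨hP, en₁, en₂, hsplit, hno⟩ := List.find?_eq_some_iff_append.mp hF
    dsimp only
    have hok : pvIdxOk j c = true := by simpa using (Bool.and_elim_left (by simpa using hP))
    have hsech : pvMemS c sech = true := by simpa using (Bool.and_elim_right (by simpa using hP))
    have h1 : ∀ p ∈ en₁, p.1 < j := by
      rw [hsplit] at hpw
      intro p hp
      exact ((List.pairwise_append.mp hpw).2.2 p hp (j, c) (by simp))
    have h2 : ∀ p ∈ en₂, j < p.1 := by
      rw [hsplit] at hpw
      intro p hp
      exact (List.pairwise_cons.mp (List.pairwise_append.mp hpw).2.1).1 p hp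
    have hj0 : (0:Int) ≤ j := hpos (j, c) (by rw [hsplit]; simp)
    -- A side
    rw [hsplit, phase1 sech others n en₁ _ 0 0 0 (by
      intro p hp; simpa only [Bool.not_eq_true'] using hno p hp)]
    have hsk : (j == 0 && c == '-') = false := by revert hok; simp [pvIdxOk]; tauto
    rw [findLoop, if_neg (by simp [hsk]),
      if_neg (by
        cases hm : pvMemS c others
        · simp
        · exact absurd hsech (by simp [hothersC c hm])),
      if_neg (by simp), if_pos hsech]
    rw [phase2 sech others n hsubC en₂ _ _ _ (by
      intro p hp
      have := h2 p hp
      have : ¬ (p.1 = 0) := by omega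
      simp [this])]
    -- B side
    have e2 : en₂.filter (fun p => decide (p.1 < j) && (pvIdxOk p.1 p.2 && pvMemS p.2 others)) = [] :=
      List.filter_eq_nil_iff.mpr (by
        intro p hp
        have := h2 p hp
        simp; omega)
    have e1 : en₁.filter (fun p => decide (p.1 < j) && (pvIdxOk p.1 p.2 && pvMemS p.2 others))
        = en₁.filter (fun p => pvIdxOk p.1 p.2 && pvMemS p.2 others) :=
      List.filter_congr (by
        intro p hp
        simp [h1 p hp])
    have hpiv : (decide (j < j) && pvMemS c pvFull) = false := by simp
    have hpiv2 : (decide (j < j) && (pvIdxOk j c && pvMemS c others)) = false := by simp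
    have hfilt : ((en₁ ++ (j, c) :: en₂).filter (fun p => decide (p.1 < j) && (pvIdxOk p.1 p.2 && pvMemS p.2 others))) = en₁.filter (fun p => pvIdxOk p.1 p.2 && pvMemS p.2 others) := by
      rw [List.filter_append, List.filter_cons, hpiv2, e1, e2]
      simp
    have hfind2 : (en₁ ++ (j, c) :: en₂).find? (fun p => decide (j < p.1) && pvMemS p.2 pvFull) = en₂.find? (fun p => pvMemS p.2 pvFull) := by
      rw [List.find?_append, List.find?_eq_none.mpr (by
        intro p hp
        have := h1 p hp
        simp; omega), Option.none_or, List.find?_cons]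
      rw [hpiv, pvFindDropLt j _ en₂ h2]
    rw [hfilt, hfind2, startUpd_eq]
    cases hL : ((en₁.filter (fun p => pvIdxOk p.1 p.2 && pvMemS p.2 others)).map Prod.fst).getLast? <;>
      cases hG : en₂.find? (fun p => pvMemS p.2 pvFull) <;> simp_all

-- ===== VERDICT (by name: the statement is the Claim_ definition above) =====
theorem find_spec : Claim_equal_find := by
  intro exp sech_operand _ hpre
  exact find_equiv_main exp sech_operand hpre
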